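-- pv_equiv track=rewrite | github.com/twandylue/LeetCode-Playground | python/number_of_subarrays_with_bounded_maximum.py | count_subarrays_with_max_leq
-- ===== SOURCE A (Python) =====
-- def count_subarrays_with_max_leq(number: int, nums: list[int]) -> int:
--     count: int = 0
--     result: int = 0
--     for num in nums:
--         if num <= number:
--             count += 1
--         else:
--             count = 0
--         result += count
--     return result
-- ===== SOURCE B (Python) =====
-- def count_subarrays_with_max_leq(number: int, nums: list[int]) -> int:
--     # Stage 1: collect lengths of maximal runs of elements <= number.
--     runs: list[int] = []
--     i, n = 0, len(nums)
--     while i < n: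
--         if nums[i] <= number:
--             j = i + 1
--             while j < n and nums[j] <= number:
--                 j += 1
--             runs.append(j - i)
--             i = j
--         else:
--             i += 1
--     # Stage 2: each run of length L contributes L*(L+1)//2 subarrays.
--     return sum(L * (L + 1) // 2 for L in runs)
-- ===== Notes on version B (the rewrite author's own statement) =====
-- stated objective: alternative
-- what changed: B is two-staged: it first extracts the lengths of maximal runs of elements <= number (an index scan that jumps past each run), then sums the closed-form triangular count L*(L+1)//2 over those lengths, instead of A's single pass that adds a running streak counter to the result at every element.
import Mathlib
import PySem

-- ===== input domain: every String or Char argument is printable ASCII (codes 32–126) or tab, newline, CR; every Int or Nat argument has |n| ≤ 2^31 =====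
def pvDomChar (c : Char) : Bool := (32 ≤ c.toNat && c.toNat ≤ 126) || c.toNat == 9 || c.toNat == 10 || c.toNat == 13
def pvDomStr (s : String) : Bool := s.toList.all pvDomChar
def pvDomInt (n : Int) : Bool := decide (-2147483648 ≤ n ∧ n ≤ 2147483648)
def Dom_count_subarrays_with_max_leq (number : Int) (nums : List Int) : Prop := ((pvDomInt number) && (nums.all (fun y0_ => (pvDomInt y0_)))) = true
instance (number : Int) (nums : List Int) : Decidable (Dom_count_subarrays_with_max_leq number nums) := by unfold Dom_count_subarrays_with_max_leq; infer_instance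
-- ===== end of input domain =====

-- B is two-staged: it first extracts the lengths of maximal runs of elements ≤ number, then sums
-- the closed-form triangular count L*(L+1)//2 over them, instead of A's single per-element tally pass.
-- ===== PORT A =====
def csGoA (number : Int) (l : List Int) (count result : Int) : Int :=
  match l with
  | [] => result
  | num :: t =>
    if num ≤ number then csGoA number t (count + 1) (result + (count + 1))
    else csGoA number t 0 (result + 0)

def count_subarrays_with_max_leq (number : Int) (nums : List Int) : Int :=
  csGoA number nums 0 0

-- ===== PORT B =====
-- Stage 1 of Source B: the outer scan; on hitting an element ≤ number it advances past the whole run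
-- (the inner while loop = counting the following elements still ≤ number) and records its length.
def csRuns (number : Int) : List Int → List Int
  | [] => []
  | num :: t =>
    if num ≤ number then
      (1 + ((t.takeWhile (fun x => decide (x ≤ number))).length : Int))
        :: csRuns number (t.dropWhile (fun x => decide (x ≤ number)))
    else csRuns number t
termination_by l => l.length
decreasing_by
  · exact Nat.lt_succ_of_le (List.length_dropWhile_le _ _)
  · simp

def count_subarrays_with_max_leq_alt (number : Int) (nums : List Int) : Int :=
  ((csRuns number nums).map (fun L => PySem.Int.floordiv (L * (L + 1)) 2)).sum

-- ===== PRECONDITION & SPEC =====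
def Spec_count_subarrays_with_max_leq (number : Int) (nums : List Int) (out : Int) : Prop := out = count_subarrays_with_max_leq_alt number nums
instance (number : Int) (nums : List Int) (out : Int) : Decidable (Spec_count_subarrays_with_max_leq number nums out) := by unfold Spec_count_subarrays_with_max_leq; infer_instance

-- ===== CLAIM (what is proved, stated in full; the proofs are below) =====
def Claim_equal_count_subarrays_with_max_leq : Prop := ∀ (number : Int) (nums : List Int), Dom_count_subarrays_with_max_leq number nums → Spec_count_subarrays_with_max_leq number nums (count_subarrays_with_max_leq number nums)

-- ===== LEMMAS AND PROOFS =====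
def csTri (run : Int) : Int := PySem.Int.floordiv (run * (run + 1)) 2

theorem csTri_succ (c : Int) : csTri (c + 1) = csTri c + (c + 1) := by
  obtain ⟨k, hk⟩ := Int.even_mul_succ_self c
  obtain ⟨m, hm⟩ := Int.even_mul_succ_self (c + 1)
  have h2 : csTri c = k := by
    simp [csTri, hk, ← two_mul, PySem.Int.floordiv, Int.mul_fdiv_cancel_left k (by norm_num : (2:Int) ≠ 0)]
  have h3 : csTri (c + 1) = m := by
    simp [csTri, hm, ← two_mul, PySem.Int.floordiv, Int.mul_fdiv_cancel_left m (by norm_num : (2:Int) ≠ 0)]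
  rw [h2, h3]; nlinarith [hk, hm]

-- running A's loop through a block of elements all ≤ number
theorem csGoA_span (number : Int) (t1 : List Int) (h : ∀ x ∈ t1, x ≤ number) :
    ∀ (t2 : List Int) (c acc : Int),
      csGoA number (t1 ++ t2) c acc
        = csGoA number t2 (c + t1.length) (acc + csTri (c + t1.length) - csTri c) := by
  induction t1 with
  | nil => intro t2 c acc; simp
  | cons x t ih =>
    intro t2 c acc
    have hx : x ≤ number := h x (by simp)
    simp only [List.cons_append, csGoA, if_pos hx]
    rw [ih (fun y hy => h y (by simp [hy]))]
    have : (c + 1) + (t.length : Int) = c + ((x :: t).length : Int) := by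
      simp; ring
    rw [this]
    congr 1
    rw [csTri_succ]; ring

theorem csGoA_reset (number : Int) (t2 : List Int)
    (h : t2 = [] ∨ ∃ y t2', t2 = y :: t2' ∧ ¬ y ≤ number) (c acc : Int) :
    csGoA number t2 c acc = csGoA number t2 0 acc := by
  rcases h with h | ⟨y, t2', h, hy⟩
  · subst h; simp [csGoA]
  · subst h; simp [csGoA, if_neg hy]

theorem main_runs (number : Int) : ∀ (n : Nat) (l : List Int), l.length ≤ n →
    ∀ acc : Int, csGoA number l 0 acc = acc + ((csRuns number l).map csTri).sum := by
  intro n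
  induction n with
  | zero =>
    intro l hl acc
    have : l = [] := List.eq_nil_of_length_eq_zero (Nat.le_zero.mp hl)
    subst this; simp [csGoA, csRuns]
  | succ n ih =>
    intro l hl acc
    match l with
    | [] => simp [csGoA, csRuns]
    | num :: t =>
      by_cases hnum : num ≤ number
      · have hsplit : t = t.takeWhile (fun x => decide (x ≤ number))
            ++ t.dropWhile (fun x => decide (x ≤ number)) := (List.takeWhile_append_dropWhile).symm
        set t1 := t.takeWhile (fun x => decide (x ≤ number)) with ht1
        set t2 := t.dropWhile (fun x => decide (x ≤ number)) with ht2
        have hmem : ∀ x ∈ t1, x ≤ number := by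
          intro x hx
          have := List.mem_takeWhile_imp hx
          simpa using this
        have hlen2 : t2.length ≤ n := by
          have h1 : t2.length ≤ t.length := List.length_dropWhile_le _ _
          have h2 : t.length ≤ n := Nat.lt_succ_iff.mp (by simpa using hl)
          omega
        have hshape : t2 = [] ∨ ∃ y t2', t2 = y :: t2' ∧ ¬ y ≤ number := by
          match he : t2 with
          | [] => exact Or.inl rfl
          | y :: t2' =>
            refine Or.inr ⟨y, t2', rfl, ?_⟩
            have hne : t.dropWhile (fun x => decide (x ≤ number)) ≠ [] := by
              rw [← ht2]; simp
            have hh := List.head_dropWhile_not (fun x => decide (x ≤ number)) (l := t) hne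
            simp only [← ht2] at hh
            simpa using hh
        have hrec : csRuns number (num :: t) = (1 + (t1.length : Int)) :: csRuns number t2 := by
          rw [csRuns]; simp [hnum, ← ht1, ← ht2]
        conv_lhs => rw [csGoA, if_pos hnum, show t = t1 ++ t2 from hsplit]
        rw [csGoA_span number t1 hmem, csGoA_reset number t2 hshape, ih t2 hlen2]
        rw [hrec]
        simp only [List.map_cons, List.sum_cons]
        have h1 : csTri 1 = 1 := by decide
        have h2 : (0:Int) + 1 + (t1.length : Int) = 1 + (t1.length : Int) := by ring
        rw [h2]
        have h3 : csTri (0 + 1) = 1 := by norm_num [h1]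
        rw [h3]
        ring
      · simp only [csGoA, if_neg hnum]
        rw [ih t (by simpa using Nat.lt_succ_iff.mp hl)]
        have : csRuns number (num :: t) = csRuns number t := by rw [csRuns]; simp [hnum]
        rw [this]; ring

-- ===== VERDICT (by name: the statement is the Claim_ definition above) =====
theorem count_subarrays_with_max_leq_spec : Claim_equal_count_subarrays_with_max_leq := by
  intro number nums _
  show count_subarrays_with_max_leq number nums = count_subarrays_with_max_leq_alt number nums
  unfold count_subarrays_with_max_leq count_subarrays_with_max_leq_alt
  rw [main_runs number nums.length nums le_rfl 0]
  simp only [zero_add]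
  rfl
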